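-- pv_equiv track=rewrite | github.com/sonyaallin/eecs4401 | assignments/assignment-resources/more-resources/2023/Self-Assessments/Assignment2/leejon79/funpuzz_csp.py | all_values
-- ===== SOURCE A (Python) =====
-- def all_values(lst, max_val, curr_size, max_size):
--    return_lst = []
--    if curr_size == max_size:
--       return [lst]
--    for i in range(1, max_val + 1):
--       tmp_lst = lst.copy()
--       tmp_lst.append(i)
--       new_size = curr_size + 1
--       tmp = all_values(tmp_lst, max_val, new_size, max_size)
--       for part in tmp:
--          return_lst.append(part)
--    return return_lst
-- ===== SOURCE B (Python) =====
-- def all_values(lst, max_val, curr_size, max_size):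
--     remaining = max_size - curr_size
--     if remaining < 0:
--         return []  # no list of exactly max_size elements extends an over-long prefix
--     result = [lst]
--     for _ in range(remaining):
--         if not result:
--             break
--         result = [partial + [i] for partial in result for i in range(1, max_val + 1)]
--     return result
-- ===== Notes on version B (the rewrite author's own statement) =====
-- stated objective: simpler
-- what changed: Replaces the tree recursion with an iterative level-by-level expansion: start from [lst] and rebuild the result (max_size - curr_size) times by appending each value 1..max_val to every partial list; when curr_size exceeds max_size it returns [] directly.
import Mathlib
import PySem

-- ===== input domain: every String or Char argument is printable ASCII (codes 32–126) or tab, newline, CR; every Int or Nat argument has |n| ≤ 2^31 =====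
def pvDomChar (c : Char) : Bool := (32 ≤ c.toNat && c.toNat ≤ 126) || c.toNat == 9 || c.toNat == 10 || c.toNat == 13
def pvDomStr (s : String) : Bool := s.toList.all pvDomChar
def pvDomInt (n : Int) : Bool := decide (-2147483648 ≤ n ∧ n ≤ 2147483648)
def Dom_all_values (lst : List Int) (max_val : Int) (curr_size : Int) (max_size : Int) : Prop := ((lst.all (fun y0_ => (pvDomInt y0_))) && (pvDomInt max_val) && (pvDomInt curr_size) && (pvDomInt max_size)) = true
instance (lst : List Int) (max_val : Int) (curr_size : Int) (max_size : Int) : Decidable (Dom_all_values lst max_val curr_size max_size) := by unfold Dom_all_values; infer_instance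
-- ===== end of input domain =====

-- B replaces A's tree recursion by an iterative level-by-level expansion (same cost, simpler shape).

-- ===== PORT A =====
-- Literal port of A's recursion; the 'max_size ≤ curr_size → []' branch is a totality
-- guard only (Python recurses forever there when max_val ≥ 1; such inputs are outside
-- Pre_all_values; when max_val ≤ 0 Python's empty value loop returns [], as here).
def all_values (lst : List Int) (max_val : Int) (curr_size : Int) (max_size : Int) : List (List Int) :=
  if curr_size = max_size then [lst]
  else if max_size ≤ curr_size then []
  else (PySem.List.pyRange 1 (max_val + 1) 1).foldl
      (fun return_lst i => return_lst ++ all_values (lst ++ [i]) max_val (curr_size + 1) max_size) []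
termination_by (max_size - curr_size).toNat
decreasing_by omega

-- ===== PORT B =====
-- Source B's 'for _ in range(remaining)' with 'if not result: break' as a counted loop
def pvAltLoop (max_val : Int) : Nat → List (List Int) → List (List Int)
  | 0, result => result
  | Nat.succ n, result =>
    if result = [] then result
    else pvAltLoop max_val n
      (result.flatMap (fun partial_ => (PySem.List.pyRange 1 (max_val + 1) 1).map (fun i => partial_ ++ [i])))

def all_values_alt (lst : List Int) (max_val : Int) (curr_size : Int) (max_size : Int) : List (List Int) :=
  if max_size - curr_size < 0 then []
  else pvAltLoop max_val (max_size - curr_size).toNat [lst]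

-- ===== PRECONDITION & SPEC =====
-- Pre_ excludes exactly the calls on which Python A never returns: curr_size > max_size with
-- max_val >= 1, where A recurses without bound (RecursionError).
def Pre_all_values (lst : List Int) (max_val : Int) (curr_size : Int) (max_size : Int) : Prop :=
  curr_size ≤ max_size ∨ max_val ≤ 0
instance (lst : List Int) (max_val : Int) (curr_size : Int) (max_size : Int) : Decidable (Pre_all_values lst max_val curr_size max_size) := by unfold Pre_all_values; infer_instance
def pvWitness_all_values : List Int × Int × Int × Int := ([5], 2, 0, 2)

def Spec_all_values (lst : List Int) (max_val : Int) (curr_size : Int) (max_size : Int) (out : List (List Int)) : Prop := out = all_values_alt lst max_val curr_size max_size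
instance (lst : List Int) (max_val : Int) (curr_size : Int) (max_size : Int) (out : List (List Int)) : Decidable (Spec_all_values lst max_val curr_size max_size out) := by unfold Spec_all_values; infer_instance

-- ===== CLAIM (what is proved, stated in full; the proofs are below) =====
def Claim_equal_all_values : Prop := ∀ (lst : List Int) (max_val : Int) (curr_size : Int) (max_size : Int), Dom_all_values lst max_val curr_size max_size → Pre_all_values lst max_val curr_size max_size → Spec_all_values lst max_val curr_size max_size (all_values lst max_val curr_size max_size)

-- ===== LEMMAS AND PROOFS =====
-- one expansion level: append each value 1..max_val to every partial list
def pvStep (max_val : Int) (res : List (List Int)) : List (List Int) :=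
  res.flatMap (fun p => (PySem.List.pyRange 1 (max_val + 1) 1).map (fun i => p ++ [i]))

theorem pvIter_nil' (mv : Int) (n : Nat) : (pvStep mv)^[n] [] = [] := by
  induction n with
  | zero => rfl
  | succ n ih => rw [Function.iterate_succ_apply]; simpa [pvStep] using ih

theorem pvAltLoop_eq_iter (mv : Int) (n : Nat) :
    ∀ r : List (List Int), pvAltLoop mv n r = (pvStep mv)^[n] r := by
  induction n with
  | zero => intro r; rfl
  | succ n ih =>
    intro r
    by_cases h : r = []
    · subst h; simp [pvAltLoop, pvIter_nil']
    · simp only [pvAltLoop, h, if_false, ih, Function.iterate_succ_apply]; rfl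

theorem pvStep_append (mv : Int) (s t : List (List Int)) :
    pvStep mv (s ++ t) = pvStep mv s ++ pvStep mv t := by
  simp [pvStep]

theorem pvIter_append (mv : Int) (n : Nat) (s t : List (List Int)) :
    (pvStep mv)^[n] (s ++ t) = (pvStep mv)^[n] s ++ (pvStep mv)^[n] t := by
  induction n generalizing s t with
  | zero => rfl
  | succ n ih => rw [Function.iterate_succ_apply, Function.iterate_succ_apply,
      Function.iterate_succ_apply, pvStep_append, ih]

theorem pvIter_flatMap (mv : Int) (n : Nat) (l : List Int) (f : Int → List (List Int)) :
    (pvStep mv)^[n] (l.flatMap f) = l.flatMap (fun i => (pvStep mv)^[n] (f i)) := by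
  induction l with
  | nil => simp [pvIter_nil']
  | cons a t ih => simp only [List.flatMap_cons, pvIter_append, ih]

theorem pvFlatMap_singleton {α β : Type} (l : List α) (f : α → List β) :
    l.flatMap (fun i => [f i]) = l.map f := by
  induction l with
  | nil => rfl
  | cons a t ih => simp [ih]

theorem pvA_eq_iter (mv ms : Int) (n : Nat) :
    ∀ (cs : Int) (lst : List Int), (ms - cs).toNat = n → cs ≤ ms →
      all_values lst mv cs ms = (pvStep mv)^[n] [lst] := by
  induction n with
  | zero =>
    intro cs lst h hle
    have : cs = ms := by omega
    rw [all_values]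
    simp [this]
  | succ n ih =>
    intro cs lst h hle
    have h1 : ¬ cs = ms := by omega
    have h2 : ¬ ms ≤ cs := by omega
    rw [all_values]
    simp only [h1, h2, if_false]
    rw [PySem.List.foldl_append_eq_flatMap]
    simp only [List.nil_append]
    have : ∀ i : Int, all_values (lst ++ [i]) mv (cs + 1) ms = (pvStep mv)^[n] [lst ++ [i]] := by
      intro i; exact ih (cs + 1) (lst ++ [i]) (by omega) (by omega)
    calc (PySem.List.pyRange 1 (mv + 1) 1).flatMap
            (fun i => all_values (lst ++ [i]) mv (cs + 1) ms)
        = (PySem.List.pyRange 1 (mv + 1) 1).flatMap (fun i => (pvStep mv)^[n] [lst ++ [i]]) := by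
          exact List.flatMap_congr (fun i _ => this i)
      _ = (pvStep mv)^[n] ((PySem.List.pyRange 1 (mv + 1) 1).flatMap (fun i => [lst ++ [i]])) := by
          rw [pvIter_flatMap]
      _ = (pvStep mv)^[n] (pvStep mv [lst]) := by
          congr 1
          simp only [pvStep, List.flatMap_singleton]
          exact pvFlatMap_singleton _ _
      _ = (pvStep mv)^[n + 1] [lst] := by rw [Function.iterate_succ_apply]

-- ===== VERDICT (by name: the statement is the Claim_ definition above) =====
theorem all_values_spec : Claim_equal_all_values := by
  intro lst mv cs ms _ hpre
  unfold Spec_all_values all_values_alt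
  by_cases hle : cs ≤ ms
  · rw [if_neg (by omega), pvAltLoop_eq_iter,
      pvA_eq_iter mv ms (ms - cs).toNat cs lst rfl hle]
  · -- cs > ms, so by Pre_ mv ≤ 0: A's value loop is empty and B returns []
    have hmv : mv ≤ 0 := by
      rcases hpre with h | h
      · exact absurd h hle
      · exact h
    rw [if_pos (by omega)]
    rw [all_values]
    rw [if_neg (by omega), if_pos (by omega)]
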